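-- pv_equiv track=rewrite | github.com/bitsofbits/advent_of_code | 2021/day_15/pythonimp/implementation.py | build_big_board
-- ===== SOURCE A (Python) =====
-- def build_big_board(board, n):
--     di = max(i for (i, j) in board) + 1
--     dj = max(j for (i, j) in board) + 1
--     big_board = {}
--     for a in range(n):
--         for b in range(n):
--             for k, c in board.items():
--                 i, j = k
--                 c = (c + a + b - 1) % 9 + 1
--                 big_board[i + a * di, j + b * dj] = c
--     return big_board
-- ===== SOURCE B (Python) =====
-- def build_big_board(board, n):
--     di = max(i for (i, j) in board) + 1
--     dj = max(j for (i, j) in board) + 1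
--
--     def bump(cells, si, sj):
--         # shift a block of cells by (si, sj) and apply one wrapping increment
--         return [((i + si, j + sj), c % 9 + 1) for (i, j), c in cells]
--
--     # seed tile = base board with values normalised into 1..9, then propagate:
--     # each tile of the first row is the previous tile bumped right, and each
--     # subsequent row is the previous row bumped down.
--     tile = [((i, j), (c - 1) % 9 + 1) for (i, j), c in board.items()]
--     row = []
--     for _ in range(n):
--         row += tile
--         tile = bump(tile, 0, dj)
--     big_board = {}
--     for _ in range(n):
--         for k, v in row:
--             big_board[k] = v
--         row = bump(row, di, 0)
--     return big_board
-- ===== Notes on version B (the rewrite author's own statement) =====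
-- stated objective: alternative
-- what changed: Instead of computing every cell independently with the closed form (c+a+b-1)%9+1, B seeds one normalised tile and propagates: each tile of the first row is the previous tile bumped by v%9+1 and shifted right, and each further row is the previous row bumped and shifted down.
import Mathlib
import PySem

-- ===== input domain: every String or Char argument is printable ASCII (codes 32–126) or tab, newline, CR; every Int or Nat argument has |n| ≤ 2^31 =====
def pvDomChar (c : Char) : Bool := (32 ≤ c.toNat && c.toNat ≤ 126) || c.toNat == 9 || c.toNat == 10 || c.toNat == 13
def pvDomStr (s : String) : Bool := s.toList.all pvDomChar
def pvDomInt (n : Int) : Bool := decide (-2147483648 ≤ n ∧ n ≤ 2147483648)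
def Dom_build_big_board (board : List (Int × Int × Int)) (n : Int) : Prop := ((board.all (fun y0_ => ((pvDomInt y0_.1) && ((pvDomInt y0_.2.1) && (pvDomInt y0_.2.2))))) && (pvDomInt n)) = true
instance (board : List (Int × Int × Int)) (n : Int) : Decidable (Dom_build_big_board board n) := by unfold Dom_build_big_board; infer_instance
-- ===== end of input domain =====

-- B replaces the per-cell closed form (c+a+b-1)%9+1 by neighbour propagation:
-- a normalised seed tile is bumped (v%9+1) rightwards along the first row, and
-- whole rows are bumped downwards; same cost, different decomposition.

-- ===== PORT A =====
def build_big_board (board : List (Int × Int × Int)) (n : Int) : List (Int × Int × Int) :=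
  match PySem.List.max? (board.map (fun t => t.1)) (fun x => x),
        PySem.List.max? (board.map (fun t => t.2.1)) (fun x => x) with
  | some mi, some mj =>
      let di := mi + 1
      let dj := mj + 1
      let big : PySem.Dict (Int × Int) Int :=
        (PySem.List.pyRange 0 n 1).foldl (fun d a =>
          (PySem.List.pyRange 0 n 1).foldl (fun d b =>
            board.foldl (fun d t =>
              d.insert (t.1 + a * di, t.2.1 + b * dj)
                (PySem.Int.mod (t.2.2 + a + b - 1) 9 + 1)) d) d)
          PySem.Dict.empty
      big.items.map (fun p => (p.1.1, p.1.2, p.2))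
  | _, _ => []  -- unreachable under Pre_ (Python raises ValueError on an empty board)

-- ===== PORT B =====
-- bump(cells, si, sj): shift a block of cells and apply one wrapping increment
def pvBump (si sj : Int) (cells : List ((Int × Int) × Int)) : List ((Int × Int) × Int) :=
  cells.map (fun p => ((p.1.1 + si, p.1.2 + sj), PySem.Int.mod p.2 9 + 1))

def build_big_board_alt (board : List (Int × Int × Int)) (n : Int) : List (Int × Int × Int) :=
  match PySem.List.max? (board.map (fun t => t.1)) (fun x => x) with
  | none => []  -- unreachable under Pre_ (Python raises ValueError on an empty board)
  | some mi =>
    match PySem.List.max? (board.map (fun t => t.2.1)) (fun x => x) with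
    | none => []
    | some mj =>
        let di := mi + 1
        let dj := mj + 1
        let seed : List ((Int × Int) × Int) :=
          board.map (fun t => ((t.1, t.2.1), PySem.Int.mod (t.2.2 - 1) 9 + 1))
        let rowSt :=
          (PySem.List.pyRange 0 n 1).foldl
            (fun (s : List ((Int × Int) × Int) × List ((Int × Int) × Int)) _ =>
              (s.1 ++ s.2, pvBump 0 dj s.2)) ([], seed)
        let bigSt :=
          (PySem.List.pyRange 0 n 1).foldl
            (fun (s : PySem.Dict (Int × Int) Int × List ((Int × Int) × Int)) _ =>
              (s.2.foldl (fun d p => d.insert p.1 p.2) s.1, pvBump di 0 s.2))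
            (PySem.Dict.empty, rowSt.1)
        bigSt.1.items.map (fun p => (p.1.1, p.1.2, p.2))

-- ===== PRECONDITION & SPEC =====
-- Pre_ excludes only the empty board, on which both Pythons raise ValueError (max of an empty sequence).
def Pre_build_big_board (board : List (Int × Int × Int)) (n : Int) : Prop := board ≠ []
instance (board : List (Int × Int × Int)) (n : Int) : Decidable (Pre_build_big_board board n) := by
  unfold Pre_build_big_board; infer_instance

def pvWitness_build_big_board : (List (Int × Int × Int)) × Int := ([(0, 0, 1), (0, 1, 7)], 2)

def Spec_build_big_board (board : List (Int × Int × Int)) (n : Int) (out : List (Int × Int × Int)) : Prop := out = build_big_board_alt board n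
instance (board : List (Int × Int × Int)) (n : Int) (out : List (Int × Int × Int)) : Decidable (Spec_build_big_board board n out) := by unfold Spec_build_big_board; infer_instance

-- ===== CLAIM (what is proved, stated in full; the proofs are below) =====
def Claim_equal_build_big_board : Prop := ∀ (board : List (Int × Int × Int)) (n : Int), Dom_build_big_board board n → Pre_build_big_board board n → Spec_build_big_board board n (build_big_board board n)

-- ===== LEMMAS AND PROOFS =====

-- the cell A writes for tile (a,b) and base entry t
def pvCell (di dj a b : Int) (t : Int × Int × Int) : (Int × Int) × Int :=
  ((t.1 + a * di, t.2.1 + b * dj), PySem.Int.mod (t.2.2 + a + b - 1) 9 + 1)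

def pvTile (di dj a b : Int) (board : List (Int × Int × Int)) : List ((Int × Int) × Int) :=
  board.map (pvCell di dj a b)

theorem pv_mod_step (x : Int) :
    PySem.Int.mod (PySem.Int.mod x 9 + 1) 9 + 1 = PySem.Int.mod (x + 1) 9 + 1 := by
  have h : ∀ a : Int, PySem.Int.mod a 9 = a % 9 := fun a =>
    PySem.Int.mod_eq_emod_of_pos (by norm_num)
  simp only [h]
  omega

theorem pv_bump_right (di dj a b : Int) (board : List (Int × Int × Int)) :
    pvBump 0 dj (pvTile di dj a b board) = pvTile di dj a (b + 1) board := by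
  simp only [pvBump, pvTile, List.map_map]
  refine List.map_congr_left (fun t _ => ?_)
  simp only [Function.comp, pvCell, pv_mod_step, Prod.mk.injEq]
  refine ⟨⟨by ring, by ring⟩, by rw [show t.2.2 + a + b - 1 + 1 = t.2.2 + a + (b + 1) - 1 from by ring]⟩

theorem pv_bump_down (di dj a b : Int) (board : List (Int × Int × Int)) :
    pvBump di 0 (pvTile di dj a b board) = pvTile di dj (a + 1) b board := by
  simp only [pvBump, pvTile, List.map_map]
  refine List.map_congr_left (fun t _ => ?_)
  simp only [Function.comp, pvCell, pv_mod_step, Prod.mk.injEq]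
  refine ⟨⟨by ring, by ring⟩, by rw [show t.2.2 + a + b - 1 + 1 = t.2.2 + (a + 1) + b - 1 from by ring]⟩

theorem pv_seed_eq (di dj : Int) (board : List (Int × Int × Int)) :
    board.map (fun t => ((t.1, t.2.1), PySem.Int.mod (t.2.2 - 1) 9 + 1))
      = pvTile di dj 0 0 board := by
  simp only [pvTile]
  refine List.map_congr_left (fun t _ => ?_)
  simp [pvCell]

-- pyRange up to a Nat cast of the length
theorem pv_pyRange_toNat (n : Int) :
    PySem.List.pyRange 0 ((n.toNat : Int)) 1 = PySem.List.pyRange 0 n 1 := by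
  by_cases h : 0 ≤ n
  · rw [Int.toNat_of_nonneg h]
  · rw [PySem.List.pyRange_one_eq_nil (by omega), PySem.List.pyRange_one_eq_nil (by omega)]

-- the row-building loop of B: invariant over any driving list
theorem pv_row_loop (di dj a : Int) (board : List (Int × Int × Int)) :
    ∀ (L : List Int) (acc : List ((Int × Int) × Int)) (b0 : Int),
      L.foldl (fun (s : List ((Int × Int) × Int) × List ((Int × Int) × Int)) _ =>
          (s.1 ++ s.2, pvBump 0 dj s.2)) (acc, pvTile di dj a b0 board)
      = (acc ++ (PySem.List.pyRange b0 (b0 + L.length) 1).flatMap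
            (fun b => pvTile di dj a b board),
         pvTile di dj a (b0 + L.length) board)
  | [], acc, b0 => by
      simp [PySem.List.pyRange_one_eq_nil (le_refl b0)]
  | x :: L, acc, b0 => by
      simp only [List.foldl_cons, pv_bump_right]
      rw [pv_row_loop di dj a board L (acc ++ pvTile di dj a b0 board) (b0 + 1)]
      rw [PySem.List.pyRange_one_cons (by simp only [List.length_cons]; push_cast; omega : b0 < b0 + (↑(x :: L).length : Int))]
      have h1 : b0 + ((x :: L).length : Int) = (b0 + 1) + (L.length : Int) := by
        simp only [List.length_cons]; push_cast; ring
      rw [h1, List.flatMap_cons, List.append_assoc]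

-- bumping a whole row down moves it to the next a
theorem pv_bump_row (di dj a x y : Int) (board : List (Int × Int × Int)) :
    pvBump di 0 ((PySem.List.pyRange x y 1).flatMap (fun b => pvTile di dj a b board))
      = (PySem.List.pyRange x y 1).flatMap (fun b => pvTile di dj (a + 1) b board) := by
  simp only [pvBump, List.map_flatMap]
  congr 1
  funext b
  exact pv_bump_down di dj a b board

-- the dict-filling loop of B: invariant over any driving list
theorem pv_dict_loop (di dj x y : Int) (board : List (Int × Int × Int)) :
    ∀ (L : List Int) (d : PySem.Dict (Int × Int) Int) (a0 : Int),
      L.foldl (fun (s : PySem.Dict (Int × Int) Int × List ((Int × Int) × Int)) _ =>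
          (s.2.foldl (fun d p => d.insert p.1 p.2) s.1, pvBump di 0 s.2))
        (d, (PySem.List.pyRange x y 1).flatMap (fun b => pvTile di dj a0 b board))
      = (((PySem.List.pyRange a0 (a0 + L.length) 1).flatMap (fun a =>
            (PySem.List.pyRange x y 1).flatMap (fun b => pvTile di dj a b board))).foldl
            (fun d p => d.insert p.1 p.2) d,
         (PySem.List.pyRange x y 1).flatMap (fun b => pvTile di dj (a0 + L.length) b board))
  | [], d, a0 => by
      simp [PySem.List.pyRange_one_eq_nil (le_refl a0)]
  | z :: L, d, a0 => by
      simp only [List.foldl_cons, pv_bump_row]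
      rw [pv_dict_loop di dj x y board L _ (a0 + 1)]
      rw [PySem.List.pyRange_one_cons (by simp only [List.length_cons]; push_cast; omega : a0 < a0 + (↑(z :: L).length : Int))]
      have h1 : a0 + ((z :: L).length : Int) = (a0 + 1) + (L.length : Int) := by
        simp only [List.length_cons]; push_cast; ring
      rw [h1, List.flatMap_cons, List.foldl_append]

-- folding inserts over a flatMap is the nested fold (A's loop shape)
theorem pv_foldl_flatMap {α β γ : Type} (L : List α) (g : α → List β)
    (f : γ → β → γ) (d : γ) :
    (L.flatMap g).foldl f d = L.foldl (fun d x => (g x).foldl f d) d := by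
  induction L generalizing d with
  | nil => rfl
  | cons x L ih => rw [List.flatMap_cons, List.foldl_append, List.foldl_cons, ih]

-- ===== VERDICT (by name: the statement is the Claim_ definition above) =====

theorem build_big_board_spec : Claim_equal_build_big_board := by
  intro board n _ _
  unfold Spec_build_big_board build_big_board build_big_board_alt
  cases hmi : PySem.List.max? (board.map (fun t => t.1)) (fun x => x) with
  | none => rfl
  | some mi =>
    cases hmj : PySem.List.max? (board.map (fun t => t.2.1)) (fun x => x) with
    | none => rfl
    | some mj =>
      simp only
      congr 1
      -- both sides are insert-folds of the same entry sequence
      rw [pv_seed_eq (mi + 1) (mj + 1) board]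
      rw [pv_row_loop (mi + 1) (mj + 1) 0 board (PySem.List.pyRange 0 n 1) [] 0]
      simp only [List.nil_append, PySem.List.length_pyRange_one, Int.sub_zero, Int.zero_add]
      rw [pv_pyRange_toNat n]
      rw [pv_dict_loop (mi + 1) (mj + 1) 0 n board (PySem.List.pyRange 0 n 1) PySem.Dict.empty 0]
      simp only [PySem.List.length_pyRange_one, Int.sub_zero, Int.zero_add]
      rw [pv_pyRange_toNat n]
      rw [pv_foldl_flatMap]
      refine congrArg PySem.Dict.items ?_
      refine PySem.List.foldl_congr_mem _ _ _ _ (fun d a _ => ?_)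
      rw [pv_foldl_flatMap]
      refine PySem.List.foldl_congr_mem _ _ _ _ (fun d b _ => ?_)
      simp only [pvTile, List.foldl_map, pvCell]
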